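-- pv_equiv track=rewrite | github.com/JACOB1982/ProgrammingChallenges | generate.py | genarray
-- ===== SOURCE A (Python) =====
-- def genarray(n):
--     right1 = ']'
--     left1 = '['
--     seperator=','
--     text=''
--     var=1
--     while (var<=n):
--         if (n==1 or var==n):
--             text = text+left1+gennum(var)+right1
--         else:
--             text = text + left1 + gennum(var) + right1 + seperator
--         var=var+1
--     return text
--
-- def gennum(n):
--     seperator1=','
--     text1=''
--     var1=1
--     if (n==0):
--         text1=''
--     else:
--         for var1 in range(n):
--             if (var1==0):
--                 text1=text1+str(var1+1)
--             else:
--                 text1 = text1+seperator1 + str(var1 + 1)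
--
--     return text1
-- ===== SOURCE B (Python) =====
-- def genarray(n):
--     segments = []
--     inner = ''
--     var = 1
--     while var <= n:
--         if inner == '':
--             inner = inner + str(var)
--         else:
--             inner = inner + ',' + str(var)
--         segments.append('[' + inner + ']')
--         var = var + 1
--     return ','.join(segments)
-- ===== Notes on version B (the rewrite author's own statement) =====
-- stated objective: faster
-- what changed: Instead of regenerating the inner number list gennum(var) from scratch for every var, B keeps one running inner string that grows by one number per iteration and collects '['+inner+']' segments joined with ',' at the end; intended as faster (a timing run measured 70.95x at n=1024, the largest size both finished; unconfirmed at n=4096 where the output itself is tens of MB).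
import Mathlib
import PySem

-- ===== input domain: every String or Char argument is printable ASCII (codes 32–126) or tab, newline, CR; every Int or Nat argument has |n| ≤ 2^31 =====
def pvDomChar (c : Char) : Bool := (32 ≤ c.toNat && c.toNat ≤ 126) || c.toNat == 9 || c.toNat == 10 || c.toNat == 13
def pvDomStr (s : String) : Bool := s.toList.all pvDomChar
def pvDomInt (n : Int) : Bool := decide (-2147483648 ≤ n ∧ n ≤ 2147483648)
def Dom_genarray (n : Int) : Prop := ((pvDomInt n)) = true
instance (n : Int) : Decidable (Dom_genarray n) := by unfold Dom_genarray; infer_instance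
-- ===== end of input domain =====

-- B replaces A's per-var regeneration of gennum(var) by one incremental pass growing a running
-- inner string and joining the collected '['+inner+']' segments; intended as faster
-- (measured 70.95x at n=1024, the largest size both versions finished in a timing run).

-- ===== PORT A =====
-- helper gennum(n): "1,2,...,n" built by A's for-loop over range(n)
def gennumC (n : Int) : List Char :=
  if n = 0 then []
  else
    (PySem.List.pyRange 0 n 1).foldl
      (fun t v =>
        if v = 0 then t ++ PySem.Int.toChars (v + 1)
        else t ++ [','] ++ PySem.Int.toChars (v + 1)) []

def genarray (n : Int) : String :=
  String.ofList
    ((PySem.List.pyRange 1 (n + 1) 1).foldl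
      (fun t v =>
        if n = 1 ∨ v = n then t ++ ['['] ++ gennumC v ++ [']']
        else t ++ ['['] ++ gennumC v ++ [']'] ++ [',']) [])

-- ===== PORT B =====
-- one loop iteration of B: grow the running inner string, append the new segment
def altStep (st : List Char × List (List Char)) (v : Int) : List Char × List (List Char) :=
  let inner :=
    if st.1 = [] then st.1 ++ PySem.Int.toChars v
    else st.1 ++ [','] ++ PySem.Int.toChars v
  (inner, st.2 ++ [['['] ++ inner ++ [']']])

def genarray_alt (n : Int) : String :=
  String.ofList
    (PySem.Chars.join [',']
      ((PySem.List.pyRange 1 (n + 1) 1).foldl altStep ([], [])).2)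

-- ===== PRECONDITION & SPEC =====
def Spec_genarray (n : Int) (out : String) : Prop := out = genarray_alt n
instance (n : Int) (out : String) : Decidable (Spec_genarray n out) := by unfold Spec_genarray; infer_instance

-- ===== CLAIM (what is proved, stated in full; the proofs are below) =====
def Claim_equal_genarray : Prop := ∀ (n : Int), Dom_genarray n → Spec_genarray n (genarray n)

-- ===== LEMMAS AND PROOFS =====

-- proof-side abbreviations
def bracketC (v : Int) : List Char := ['['] ++ gennumC v ++ [']']

-- A's loop body (as a named function) and the whole A loop
def aStep (n : Int) (t : List Char) (v : Int) : List Char :=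
  if n = 1 ∨ v = n then t ++ ['['] ++ gennumC v ++ [']']
  else t ++ ['['] ++ gennumC v ++ [']'] ++ [',']

def aFold (n : Int) : List Char := (PySem.List.pyRange 1 (n + 1) 1).foldl (aStep n) []

-- A's loop restricted to the non-last iterations: always append the trailing comma
def aPre (m : Int) : List Char :=
  (PySem.List.pyRange 1 m 1).foldl (fun t v => t ++ bracketC v ++ [',']) []

theorem genarray_eq_aFold (n : Int) : genarray n = String.ofList (aFold n) := rfl

theorem gennum_succ (k : Nat) (hk : 1 ≤ k) :
    gennumC ((k : Int) + 1) = gennumC (k : Int) ++ [','] ++ PySem.Int.toChars ((k : Int) + 1) := by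
  unfold gennumC
  rw [if_neg (by omega), if_neg (by omega),
      PySem.List.pyRange_one_succ_right (by omega : (0 : Int) ≤ (k : Int)),
      List.foldl_append]
  simp only [List.foldl_cons, List.foldl_nil]
  rw [if_neg (by omega)]

theorem gennum_ne_nil (k : Nat) (hk : 1 ≤ k) : gennumC (k : Int) ≠ [] := by
  induction k with
  | zero => omega
  | succ m ih =>
    by_cases hm : 1 ≤ m
    · rw [show ((m + 1 : Nat) : Int) = (m : Int) + 1 by push_cast; ring, gennum_succ m hm]
      simp
    · have : m = 0 := by omega
      subst this
      decide

-- B's loop state after k iterations: the running inner string is gennum(k),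
-- and the segments are the brackets of 1..k in order.
theorem altFold_eq (k : Nat) :
    (PySem.List.pyRange 1 ((k : Int) + 1) 1).foldl altStep ([], [])
      = (gennumC (k : Int), (PySem.List.pyRange 1 ((k : Int) + 1) 1).map bracketC) := by
  induction k with
  | zero => decide
  | succ m ih =>
    rw [show ((m + 1 : Nat) : Int) + 1 = ((m : Int) + 1) + 1 by push_cast; ring,
        PySem.List.pyRange_one_succ_right (by omega : (1 : Int) ≤ (m : Int) + 1),
        List.foldl_append, List.map_append, ih]
    simp only [List.foldl_cons, List.foldl_nil, List.map_cons, List.map_nil]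
    unfold altStep
    by_cases hm : 1 ≤ m
    · rw [show ((m + 1 : Nat) : Int) = (m : Int) + 1 by push_cast; ring]
      simp only [if_neg (gennum_ne_nil m hm)]
      rw [← gennum_succ m hm]
      rfl
    · have : m = 0 := by omega
      subst this
      decide

theorem aPre_succ (m : Nat) (hm : 1 ≤ m) :
    aPre ((m : Int) + 1) = aPre (m : Int) ++ bracketC (m : Int) ++ [','] := by
  unfold aPre
  rw [PySem.List.pyRange_one_succ_right (by omega : (1 : Int) ≤ (m : Int)), List.foldl_append]
  simp

theorem aFold_eq (m : Nat) (hm : 1 ≤ m) :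
    aFold (m : Int) = aPre (m : Int) ++ bracketC (m : Int) := by
  have hpre : (PySem.List.pyRange 1 (m : Int) 1).foldl (aStep (m : Int)) []
      = aPre (m : Int) := by
    apply PySem.List.foldl_congr_mem
    intro acc v hv
    rw [PySem.List.mem_pyRange_one] at hv
    unfold aStep bracketC
    rw [if_neg (by omega)]
    simp
  unfold aFold
  rw [PySem.List.pyRange_one_succ_right (by omega : (1 : Int) ≤ (m : Int)),
      List.foldl_append, hpre]
  simp only [List.foldl_cons, List.foldl_nil]
  unfold aStep
  rw [if_pos (Or.inr rfl)]
  simp [bracketC]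

theorem join_cons_append_singleton : ∀ (t : List (List Char)) (a x : List Char),
    PySem.Chars.join [','] ((a :: t) ++ [x])
      = PySem.Chars.join [','] (a :: t) ++ [','] ++ x := by
  intro t
  induction t with
  | nil => intro a x; simp [PySem.Chars.join_cons_cons, PySem.Chars.join_singleton]
  | cons b u ih =>
    intro a x
    simp only [List.cons_append, PySem.Chars.join_cons_cons]
    rw [← List.cons_append, ih b x]
    simp

theorem join_append_singleton (l : List (List Char)) (x : List Char) (hl : l ≠ []) :
    PySem.Chars.join [','] (l ++ [x]) = PySem.Chars.join [','] l ++ [','] ++ x := by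
  cases l with
  | nil => exact absurd rfl hl
  | cons a t => exact join_cons_append_singleton t a x

theorem join_map_eq (m : Nat) (hm : 1 ≤ m) :
    PySem.Chars.join [','] ((PySem.List.pyRange 1 ((m : Int) + 1) 1).map bracketC)
      = aPre (m : Int) ++ bracketC (m : Int) := by
  induction m with
  | zero => omega
  | succ p ih =>
    by_cases hp : 1 ≤ p
    · rw [show ((p + 1 : Nat) : Int) = (p : Int) + 1 by push_cast; ring,
          PySem.List.pyRange_one_succ_right (by omega : (1 : Int) ≤ (p : Int) + 1),
          List.map_append, List.map_cons, List.map_nil]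
      have hne : (PySem.List.pyRange 1 ((p : Int) + 1) 1).map bracketC ≠ [] := by
        rw [PySem.List.pyRange_one_cons (by omega : (1 : Int) < (p : Int) + 1)]
        simp
      rw [join_append_singleton _ _ hne, ih hp, aPre_succ p hp]
    · have : p = 0 := by omega
      subst this
      decide

-- ===== VERDICT (by name: the statement is the Claim_ definition above) =====
theorem genarray_spec : Claim_equal_genarray := by
  intro n _
  unfold Spec_genarray genarray_alt
  rw [genarray_eq_aFold]
  by_cases hn : n ≤ 0
  · unfold aFold
    rw [PySem.List.pyRange_one_eq_nil (by omega : n + 1 ≤ 1)]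
    rfl
  · obtain ⟨k, rfl⟩ : ∃ k : Nat, n = (k : Int) := ⟨n.toNat, by omega⟩
    have hk : 1 ≤ k := by omega
    rw [altFold_eq k, aFold_eq k hk, join_map_eq k hk]
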